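-- pv_equiv track=rewrite | github.com/Kris465/MemoryBox | old_projects/for_check/block6/main22.py | analyze_number
-- ===== SOURCE A (Python) =====
-- def analyze_number(n):
--     # Преобразуем число в строку для удобной работы с цифрами
--     digits = str(n)
--
--     # а) Количество цифр 3
--     count_3 = sum(1 for digit in digits if digit == '3')
--
--     # б) Количество последней цифры
--     last_digit = digits[-1]
--     count_last = sum(1 for digit in digits if digit == last_digit)
--
--     # в) Количество четных цифр (без составного условия)
--     count_even = sum(1 for digit in digits if int(digit) % 2 == 0)
--
--     # г) Сумма цифр, больших пяти
--     sum_greater_5 = sum(int(digit) for digit in digits if int(digit) > 5)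
--
--     # д) Произведение цифр, больших семи
--     product_greater_7 = 1
--     for digit in digits:
--         if int(digit) > 7:
--             product_greater_7 *= int(digit)
--
--     # е) Количество цифр 0 и 5
--     count_0_5 = sum(1 for digit in digits if digit in '05')
--
--     return {
--         'количество_3': count_3,
--         'количество_последней_цифры': count_last,
--         'количество_четных_цифр': count_even,
--         'сумма_цифр_больше_5': sum_greater_5,
--         'произведение_цифр_больше_7': product_greater_7,
--         'количество_0_и_5': count_0_5
--     }
-- ===== SOURCE B (Python) =====
-- def analyze_number(n):
--     # Histogram approach: tally how often each digit value 0..9 occurs, once,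
--     # then derive every statistic from the ten tallies in closed form
--     # (the product of digits > 7 becomes 8**freq[8] * 9**freq[9]).
--     s = str(n)
--     freq = [0] * 10
--     for d in s:
--         freq[int(d)] += 1
--     last = int(s[-1])
--     return {
--         'количество_3': freq[3],
--         'количество_последней_цифры': freq[last],
--         'количество_четных_цифр': freq[0] + freq[2] + freq[4] + freq[6] + freq[8],
--         'сумма_цифр_больше_5': 6 * freq[6] + 7 * freq[7] + 8 * freq[8] + 9 * freq[9],
--         'произведение_цифр_больше_7': 8 ** freq[8] * 9 ** freq[9],
--         'количество_0_и_5': freq[0] + freq[5]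
--     }
-- ===== Notes on version B (the rewrite author's own statement) =====
-- stated objective: alternative
-- what changed: A's six independent scans of the digit string are replaced by a 10-bucket digit histogram built in one pass, with every statistic then derived from the ten tallies in closed form (the product of digits > 7 becomes 8**freq[8] * 9**freq[9]).
import Mathlib
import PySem

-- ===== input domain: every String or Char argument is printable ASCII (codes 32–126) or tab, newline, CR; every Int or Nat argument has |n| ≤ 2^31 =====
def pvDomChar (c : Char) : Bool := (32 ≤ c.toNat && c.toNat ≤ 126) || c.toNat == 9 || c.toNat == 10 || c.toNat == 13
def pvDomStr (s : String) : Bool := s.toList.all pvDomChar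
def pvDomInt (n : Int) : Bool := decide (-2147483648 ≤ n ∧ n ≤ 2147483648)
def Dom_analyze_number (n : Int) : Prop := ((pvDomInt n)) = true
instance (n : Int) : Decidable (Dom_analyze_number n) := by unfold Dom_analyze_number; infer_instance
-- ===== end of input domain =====

-- B replaces A's six scans of the digit string by a 10-bucket digit histogram built once,
-- from which every statistic is derived in closed form (the product of digits > 7 becomes 8^f8 * 9^f9).

-- ===== PORT A =====
-- int(d) for a single character d; total form of Python's int() (Pre_ guarantees every character is a digit)
def pyIntChar (c : Char) : Int := (PySem.Int.ofChars? [c]).getD 0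

def analyze_number (n : Int) : List (String × Int) :=
  let digits := PySem.Int.toChars n
  let count_3 : Int := ((digits.filter (fun d => d == '3')).map (fun _ => (1 : Int))).sum
  let last_digit := (PySem.List.pyGet? digits (-1)).getD '0'   -- digits is never empty for str(n)
  let count_last : Int := ((digits.filter (fun d => d == last_digit)).map (fun _ => (1 : Int))).sum
  let count_even : Int := ((digits.filter (fun d => PySem.Int.mod (pyIntChar d) 2 == 0)).map (fun _ => (1 : Int))).sum
  let sum_greater_5 : Int := ((digits.filter (fun d => 5 < pyIntChar d)).map pyIntChar).sum
  let product_greater_7 : Int := digits.foldl (fun acc d => if 7 < pyIntChar d then acc * pyIntChar d else acc) 1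
  -- 'digit in "05"' for a single character = membership among the characters (exact)
  let count_0_5 : Int := ((digits.filter (fun d => d == '0' || d == '5')).map (fun _ => (1 : Int))).sum
  [("количество_3", count_3),
   ("количество_последней_цифры", count_last),
   ("количество_четных_цифр", count_even),
   ("сумма_цифр_больше_5", sum_greater_5),
   ("произведение_цифр_больше_7", product_greater_7),
   ("количество_0_и_5", count_0_5)]

-- ===== PORT B =====
-- one histogram pass: freq[int(d)] += 1
def histStep (f : List Int) (d : Char) : List Int :=
  PySem.List.pySetD f (pyIntChar d) (PySem.List.pyGetD f (pyIntChar d) 0 + 1)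

def analyze_number_alt (n : Int) : List (String × Int) :=
  let s := PySem.Int.toChars n
  let freq := s.foldl histStep (List.replicate 10 (0 : Int))
  let last := pyIntChar ((PySem.List.pyGet? s (-1)).getD '0')
  [("количество_3", PySem.List.pyGetD freq 3 0),
   ("количество_последней_цифры", PySem.List.pyGetD freq last 0),
   ("количество_четных_цифр", PySem.List.pyGetD freq 0 0 + PySem.List.pyGetD freq 2 0
      + PySem.List.pyGetD freq 4 0 + PySem.List.pyGetD freq 6 0 + PySem.List.pyGetD freq 8 0),
   ("сумма_цифр_больше_5", 6 * PySem.List.pyGetD freq 6 0 + 7 * PySem.List.pyGetD freq 7 0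
      + 8 * PySem.List.pyGetD freq 8 0 + 9 * PySem.List.pyGetD freq 9 0),
   ("произведение_цифр_больше_7", 8 ^ (PySem.List.pyGetD freq 8 0).toNat * 9 ^ (PySem.List.pyGetD freq 9 0).toNat),
   ("количество_0_и_5", PySem.List.pyGetD freq 0 0 + PySem.List.pyGetD freq 5 0)]

-- ===== PRECONDITION & SPEC =====
-- Python's int(digit) raises ValueError on the '-' character of str(n) for negative n, so A only returns on 0 ≤ n.
def Pre_analyze_number (n : Int) : Prop := 0 ≤ n
instance (n : Int) : Decidable (Pre_analyze_number n) := by unfold Pre_analyze_number; infer_instance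
def pvWitness_analyze_number : Int := (3350857)

def Spec_analyze_number (n : Int) (out : List (String × Int)) : Prop := out = analyze_number_alt n
instance (n : Int) (out : List (String × Int)) : Decidable (Spec_analyze_number n out) := by unfold Spec_analyze_number; infer_instance

-- ===== CLAIM (what is proved, stated in full; the proofs are below) =====
def Claim_equal_analyze_number : Prop := ∀ (n : Int), Dom_analyze_number n → Pre_analyze_number n → Spec_analyze_number n (analyze_number n)

-- ===== LEMMAS AND PROOFS =====

def pvDigits : List Char := ['0', '1', '2', '3', '4', '5', '6', '7', '8', '9']

-- str(m) for m : Nat consists of digit characters only, and is nonempty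
theorem toDigitsCore_digits (f : Nat) : ∀ (m : Nat) (ds : List Char),
    (∀ c ∈ ds, c ∈ pvDigits) → ∀ c ∈ Nat.toDigitsCore 10 f m ds, c ∈ pvDigits := by
  induction f with
  | zero => intro m ds hds; simpa [Nat.toDigitsCore] using hds
  | succ f ih =>
    intro m ds hds
    have hd : (m % 10).digitChar ∈ pvDigits := by
      have : m % 10 = 0 ∨ m % 10 = 1 ∨ m % 10 = 2 ∨ m % 10 = 3 ∨ m % 10 = 4 ∨ m % 10 = 5 ∨
          m % 10 = 6 ∨ m % 10 = 7 ∨ m % 10 = 8 ∨ m % 10 = 9 := by omega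
      rcases this with h|h|h|h|h|h|h|h|h|h <;> rw [h] <;> decide
    simp only [Nat.toDigitsCore]
    split
    · intro c hc
      rcases List.mem_cons.mp hc with rfl | hc
      · exact hd
      · exact hds c hc
    · exact ih (m / 10) _ (by
        intro c hc
        rcases List.mem_cons.mp hc with rfl | hc
        · exact hd
        · exact hds c hc)

theorem toDigitsCore_ne_nil (f : Nat) : ∀ (m : Nat) (ds : List Char), ds ≠ [] →
    Nat.toDigitsCore 10 f m ds ≠ [] := by
  induction f with
  | zero => intro m ds h; simpa [Nat.toDigitsCore] using h
  | succ f ih =>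
    intro m ds _
    simp only [Nat.toDigitsCore]
    split
    · simp
    · exact ih (m / 10) _ (by simp)

theorem toDigits_digits (m : Nat) : ∀ c ∈ Nat.toDigits 10 m, c ∈ pvDigits :=
  toDigitsCore_digits (m + 1) m [] (by simp)

theorem toDigits_ne_nil (m : Nat) : Nat.toDigits 10 m ≠ [] := by
  unfold Nat.toDigits
  simp only [Nat.toDigitsCore]
  split
  · simp
  · exact toDigitsCore_ne_nil m (m / 10) _ (by simp)

theorem toChars_of_nonneg (n : Int) (h : 0 ≤ n) :
    PySem.Int.toChars n = Nat.toDigits 10 n.toNat := by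
  simp [PySem.Int.toChars, not_lt.mpr h]

-- evaluation of pyIntChar on the ten digit characters
@[simp] theorem pic0 : pyIntChar '0' = 0 := by decide
@[simp] theorem pic1 : pyIntChar '1' = 1 := by decide
@[simp] theorem pic2 : pyIntChar '2' = 2 := by decide
@[simp] theorem pic3 : pyIntChar '3' = 3 := by decide
@[simp] theorem pic4 : pyIntChar '4' = 4 := by decide
@[simp] theorem pic5 : pyIntChar '5' = 5 := by decide
@[simp] theorem pic6 : pyIntChar '6' = 6 := by decide
@[simp] theorem pic7 : pyIntChar '7' = 7 := by decide
@[simp] theorem pic8 : pyIntChar '8' = 8 := by decide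
@[simp] theorem pic9 : pyIntChar '9' = 9 := by decide

-- a 1-per-match sum IS a countP
theorem sum_ones_filter (p : Char → Bool) (cs : List Char) :
    ((cs.filter p).map (fun _ => (1 : Int))).sum = (cs.countP p : Int) := by
  simp [List.countP_eq_length_filter]

theorem count_eq_countP (cs : List Char) (a : Char) :
    cs.count a = cs.countP (fun d => d == a) := rfl

-- A's even-digit scan as histogram counts (all-digit input)
theorem even_cnt (cs : List Char) (h : ∀ c ∈ cs, c ∈ pvDigits) :
    cs.countP (fun d => PySem.Int.mod (pyIntChar d) 2 == 0) =
      cs.count '0' + cs.count '2' + cs.count '4' + cs.count '6' + cs.count '8' := by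
  induction cs with
  | nil => simp
  | cons x cs ih =>
    have hx := h x (by simp)
    have ht := ih (fun c hc => h c (by simp [hc]))
    simp only [pvDigits, List.mem_cons] at hx
    rcases hx with rfl|rfl|rfl|rfl|rfl|rfl|rfl|rfl|rfl|rfl|hx
    all_goals first
      | exact absurd hx (by simp)
      | (simp [List.countP_cons, List.count_cons] at ht ⊢; omega)

-- A's '0'-or-'5' scan as histogram counts
theorem c05_cnt (cs : List Char) :
    cs.countP (fun d => d == '0' || d == '5') = cs.count '0' + cs.count '5' := by
  induction cs with
  | nil => simp
  | cons x cs ih =>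
    by_cases h0 : x = '0'
    · simp [List.countP_cons, List.count_cons, h0, ih]; omega
    · by_cases h5 : x = '5' <;> simp [List.countP_cons, List.count_cons, h0, h5, ih] <;> omega

-- A's sum-of-digits-greater-than-5 scan as histogram counts
theorem sum5_scan (cs : List Char) (h : ∀ c ∈ cs, c ∈ pvDigits) :
    ((cs.filter (fun d => 5 < pyIntChar d)).map pyIntChar).sum =
      6 * (cs.count '6' : Int) + 7 * cs.count '7' + 8 * cs.count '8' + 9 * cs.count '9' := by
  induction cs with
  | nil => simp
  | cons x cs ih =>
    have hx := h x (by simp)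
    have ht := ih (fun c hc => h c (by simp [hc]))
    simp only [pvDigits, List.mem_cons] at hx
    rcases hx with rfl|rfl|rfl|rfl|rfl|rfl|rfl|rfl|rfl|rfl|hx
    all_goals first
      | exact absurd hx (by simp)
      | (simp [List.filter_cons, List.count_cons] at ht ⊢; push_cast at ht ⊢; omega)

-- A's product-of-digits-greater-than-7 loop as powers of histogram counts
theorem prod7_scan (cs : List Char) (h : ∀ c ∈ cs, c ∈ pvDigits) : ∀ (e : Int),
    cs.foldl (fun acc d => if 7 < pyIntChar d then acc * pyIntChar d else acc) e =
      e * 8 ^ cs.count '8' * 9 ^ cs.count '9' := by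
  induction cs with
  | nil => simp
  | cons x cs ih =>
    intro e
    have hx := h x (by simp)
    have ht := ih (fun c hc => h c (by simp [hc]))
    simp only [pvDigits, List.mem_cons] at hx
    rcases hx with rfl|rfl|rfl|rfl|rfl|rfl|rfl|rfl|rfl|rfl|hx
    all_goals first
      | exact absurd hx (by simp)
      | (simp [List.foldl_cons, List.count_cons, ht, pow_succ]; try ring)

-- B's fold builds exactly the histogram of digit counts
theorem hist_fold (cs : List Char) (h : ∀ c ∈ cs, c ∈ pvDigits) :
    ∀ (f0 f1 f2 f3 f4 f5 f6 f7 f8 f9 : Int),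
    cs.foldl histStep [f0, f1, f2, f3, f4, f5, f6, f7, f8, f9] =
      [f0 + cs.count '0', f1 + cs.count '1', f2 + cs.count '2', f3 + cs.count '3',
       f4 + cs.count '4', f5 + cs.count '5', f6 + cs.count '6', f7 + cs.count '7',
       f8 + cs.count '8', f9 + cs.count '9'] := by
  induction cs with
  | nil => simp
  | cons x cs ih =>
    intro f0 f1 f2 f3 f4 f5 f6 f7 f8 f9
    have hx := h x (by simp)
    have ht := ih (fun c hc => h c (by simp [hc]))
    simp only [pvDigits, List.mem_cons] at hx
    rcases hx with rfl|rfl|rfl|rfl|rfl|rfl|rfl|rfl|rfl|rfl|hx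
    all_goals first
      | exact absurd hx (by simp)
      | (simp only [List.foldl_cons, histStep]
         simp [PySem.List.pySetD_of_nonneg, PySem.List.pyGetD, PySem.List.pyGet?,
               PySem.List.pyIdx?, List.set, ht, List.count_cons]
         push_cast
         omega)

-- str(n)[-1] is the last character
theorem pyGetLast_eq (xs : List Char) (h : xs ≠ []) :
    (PySem.List.pyGet? xs (-1)).getD '0' = xs.getLast h := by
  simp [pysem]
  exact congrArg (Option.getD · '0') (List.getLast?_eq_some_getLast h)

-- ===== VERDICT (by name: the statement is the Claim_ definition above) =====
theorem analyze_number_spec : Claim_equal_analyze_number := by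
  intro n _ hn
  unfold Spec_analyze_number analyze_number analyze_number_alt
  simp only [toChars_of_nonneg n hn]
  have hdig := toDigits_digits n.toNat
  have hne := toDigits_ne_nil n.toNat
  set cs := Nat.toDigits 10 n.toNat with hcs
  have hrep : (List.replicate 10 (0 : Int)) = [0, 0, 0, 0, 0, 0, 0, 0, 0, 0] := rfl
  rw [hrep, hist_fold cs hdig, pyGetLast_eq cs hne]
  have hlastd : cs.getLast hne ∈ pvDigits := hdig _ (List.getLast_mem hne)
  rw [sum_ones_filter, sum_ones_filter, sum_ones_filter, sum_ones_filter,
      even_cnt cs hdig, c05_cnt cs, sum5_scan cs hdig, prod7_scan cs hdig 1]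
  simp only [pvDigits, List.mem_cons] at hlastd
  rcases hlastd with he|he|he|he|he|he|he|he|he|he|he
  all_goals first
    | exact absurd he (by simp)
    | (rw [he]
       simp [PySem.List.pyGetD, PySem.List.pyGet?, PySem.List.pyIdx?, count_eq_countP])
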